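-- pv_equiv track=rewrite | github.com/Retrix165/zero-knowledge-proof-explorations | zk_tutorial.py | make_p
-- ===== SOURCE A (Python) =====
-- def make_p(a1: list, a2: list):
--     assert(len(a1)==len(a2))
--     p_list = [0]
--     for i in range(len(a1)):
--         s = 0
--         for j in range(i+1):
--             s += a1[j] * a2[j]
--         p_list.append(s)
--     return p_list
-- ===== SOURCE B (Python) =====
-- def make_p(a1: list, a2: list):
--     assert(len(a1)==len(a2))
--     p_list = [0]
--     s = 0
--     for x, y in zip(a1, a2):
--         s += x * y
--         p_list.append(s)
--     return p_list
-- ===== Notes on version B (the rewrite author's own statement) =====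
-- stated objective: faster
-- what changed: Replaced the nested loop that recomputes each prefix sum of products from scratch with a single pass over zip(a1, a2) maintaining a running sum.
import Mathlib
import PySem

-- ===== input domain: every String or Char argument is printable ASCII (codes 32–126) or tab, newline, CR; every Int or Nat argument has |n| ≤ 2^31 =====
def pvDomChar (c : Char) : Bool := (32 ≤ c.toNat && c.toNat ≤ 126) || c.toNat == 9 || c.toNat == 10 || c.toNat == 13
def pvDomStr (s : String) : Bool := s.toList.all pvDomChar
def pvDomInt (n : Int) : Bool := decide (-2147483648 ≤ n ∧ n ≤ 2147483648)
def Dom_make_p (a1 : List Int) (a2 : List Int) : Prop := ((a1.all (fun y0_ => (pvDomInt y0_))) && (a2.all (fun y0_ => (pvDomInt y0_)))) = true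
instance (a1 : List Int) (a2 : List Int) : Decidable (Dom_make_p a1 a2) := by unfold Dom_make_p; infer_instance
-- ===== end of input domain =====

-- B replaces A's quadratic recomputation of each prefix sum of products by a single
-- pass over zip(a1, a2) with a running sum (objective: faster, asymptotic O(n^2) -> O(n)).


-- ===== PORT A =====
-- Literal port of A: p_list = [0]; for i in range(len(a1)): s = 0;
-- for j in range(i+1): s += a1[j]*a2[j]; p_list.append(s).
-- a1[j]/a2[j] ported via pyGetD (exact here: Pre_ asserts equal lengths and j < len).
def make_p (a1 : List Int) (a2 : List Int) : List Int :=
  (PySem.List.pyRange 0 a1.length 1).foldl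
    (fun p_list i =>
      p_list ++ [(PySem.List.pyRange 0 (i + 1) 1).foldl
        (fun s j => s + PySem.List.pyGetD a1 j 0 * PySem.List.pyGetD a2 j 0) 0])
    [0]

-- ===== PORT B =====
-- Port of B: one pass over zip(a1, a2) carrying (p_list, running sum s).
def make_p_alt (a1 : List Int) (a2 : List Int) : List Int :=
  ((a1.zip a2).foldl
    (fun (st : List Int × Int) xy =>
      let s := st.2 + xy.1 * xy.2
      (st.1 ++ [s], s))
    ([0], 0)).1

-- ===== PRECONDITION & SPEC =====
-- A's assert raises AssertionError unless the two lists have equal length.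
def Pre_make_p (a1 : List Int) (a2 : List Int) : Prop := a1.length = a2.length
instance (a1 : List Int) (a2 : List Int) : Decidable (Pre_make_p a1 a2) := by unfold Pre_make_p; infer_instance
def pvWitness_make_p : List Int × List Int := ([1, 2, 3], [4, 5, 6])
def Spec_make_p (a1 : List Int) (a2 : List Int) (out : List Int) : Prop := out = make_p_alt a1 a2
instance (a1 : List Int) (a2 : List Int) (out : List Int) : Decidable (Spec_make_p a1 a2 out) := by unfold Spec_make_p; infer_instance

-- ===== CLAIM (what is proved, stated in full; the proofs are below) =====
def Claim_equal_make_p : Prop := ∀ (a1 : List Int) (a2 : List Int), Dom_make_p a1 a2 → Pre_make_p a1 a2 → Spec_make_p a1 a2 (make_p a1 a2)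

-- ===== LEMMAS AND PROOFS =====

-- prefix sum of products of the zipped lists
def pvP (a1 a2 : List Int) (k : Nat) : Int :=
  (((a1.zip a2).take k).map (fun p => p.1 * p.2)).sum

-- A's inner loop computes pvP
theorem pv_inner (a1 a2 : List Int) (h : a1.length = a2.length) (k : Nat) (hk : k ≤ a1.length) :
    (PySem.List.pyRange 0 ((k : Int)) 1).foldl
      (fun s j => s + PySem.List.pyGetD a1 j 0 * PySem.List.pyGetD a2 j 0) 0
    = pvP a1 a2 k := by
  induction k with
  | zero => simp [pvP]
  | succ n ih =>
    have hn : n < a1.length := Nat.lt_of_succ_le hk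
    have hrange : PySem.List.pyRange 0 ((n : Int) + 1) 1
        = PySem.List.pyRange 0 ((n : Int)) 1 ++ [(n : Int)] :=
      PySem.List.pyRange_one_succ_right (by positivity)
    have hzl : n < (a1.zip a2).length := by simp [List.length_zip, h] at *; omega
    have hget : (a1.zip a2)[n] = (a1[n]'hn, a2[n]'(h ▸ hn)) := by
      simp [List.getElem_zip]
    have hP : pvP a1 a2 (n + 1) = pvP a1 a2 n + a1[n]'hn * a2[n]'(h ▸ hn) := by
      unfold pvP
      rw [List.take_succ, List.getElem?_eq_getElem hzl]
      simp [hget]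
    push_cast
    rw [hrange, List.foldl_append, ih (Nat.le_of_lt hn), hP]
    have hn2 : n < a2.length := h ▸ hn
    simp [List.getElem?_eq_getElem hn, List.getElem?_eq_getElem hn2]

-- append-only foldl is init ++ map
theorem pv_foldl_app (g : Int → Int) (l : List Int) :
    ∀ acc : List Int, l.foldl (fun p i => p ++ [g i]) acc = acc ++ l.map g := by
  induction l with
  | nil => simp
  | cons x t ih => intro acc; simp [ih]

-- B's fold, generalized over accumulator and running sum
theorem pv_bfold (l : List (Int × Int)) :
    ∀ (acc : List Int) (s : Int),
      (l.foldl (fun (st : List Int × Int) xy =>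
        (st.1 ++ [st.2 + xy.1 * xy.2], st.2 + xy.1 * xy.2)) (acc, s)).1
      = acc ++ (List.range l.length).map
          (fun k => s + ((l.take (k + 1)).map (fun p => p.1 * p.2)).sum) := by
  induction l with
  | nil => simp
  | cons x t ih =>
    intro acc s
    simp only [List.foldl_cons, ih, List.length_cons, List.range_succ_eq_map]
    simp [List.map_map, Function.comp, List.take_succ_cons, add_assoc]

theorem make_p_eq (a1 a2 : List Int) (h : a1.length = a2.length) :
    make_p a1 a2 = make_p_alt a1 a2 := by
  have hz : (a1.zip a2).length = a1.length := by simp [List.length_zip, h]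
  unfold make_p make_p_alt
  rw [pv_foldl_app, pv_bfold, hz, PySem.List.pyRange_one]
  simp only [sub_zero, Int.toNat_natCast, List.map_map]
  refine congrArg (List.cons 0) (List.map_congr_left ?_)
  intro k hk
  rw [List.mem_range] at hk
  have : ((0 : Int) + (k : Int)) = ((k : Int)) := by ring
  simp only [Function.comp, this]
  have := pv_inner a1 a2 h (k + 1) hk
  push_cast at this ⊢
  rw [this]
  simp [pvP]

-- ===== VERDICT (by name: the statement is the Claim_ definition above) =====
theorem make_p_spec : Claim_equal_make_p := by
  intro a1 a2 _ hpre
  exact make_p_eq a1 a2 hpre
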